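-- pv_equiv track=rewrite | github.com/yosuke7040/atcoder | ABC/problems/abc182/abc182_c.py | min_digits_to_remove_for_multiple_of_three
-- ===== SOURCE A (Python) =====
-- def min_digits_to_remove_for_multiple_of_three(n):
--     list_n = list(str(n))
--     amari_1 = False
--     amari_2 = False
--
--     for i in range(len(list_n)):
--         if int(list_n[i]) % 3 == 1:
--             amari_1 = True
--         if int(list_n[i]) % 3 == 2:
--             amari_2 = True
--
--     if n % 3 == 0:
--         return 0
--
--     # 全体の余りが1
--     if n % 3 == 1:
--         # 余りが1の桁がある
--         if amari_1:
--             # 桁が1つの場合むり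
--             if len(list_n) == 1:
--                 return -1
--             return 1
--
--         # 余りが2の桁が2つある
--         if amari_2:
--             # 桁が2つの場合むり
--             if len(list_n) == 2:
--                 return -1
--             return 2
--
--     # 全体の余りが2
--     if n % 3 == 2:
--         # 余りが2の桁がある
--         if amari_2:
--             # 桁が1つの場合むり
--             if len(list_n) == 1:
--                 return -1
--             return 1
--
--         # 余りが1の桁が2つある
--         if amari_1:
--             # 桁が2つの場合むり
--             if len(list_n) == 2:
--                 return -1
--             return 2
--
--     return -1
-- ===== SOURCE B (Python) =====
-- def min_digits_to_remove_for_multiple_of_three(n):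
--     digits = [int(c) for c in str(n)]
--     L = len(digits)
--     INF = L + 1
--     # best[t] = minimal number of digits removed so far whose digit-sum is ≡ t (mod 3)
--     best = [0, INF, INF]
--     for d in digits:
--         r = d % 3
--         best = [min(best[t], best[(t - r) % 3] + 1) for t in range(3)]
--     k = best[n % 3]
--     return k if k < L else -1
-- ===== Notes on version B (the rewrite author's own statement) =====
-- stated objective: alternative
-- what changed: Replaces A's two boolean remainder flags and hand-written nested case table by a one-pass dynamic program over the digits (best[t] = minimal number of removed digits whose sum is congruent to t mod 3), reading the answer off best[n % 3] with a single keep-at-least-one-digit check.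
import Mathlib
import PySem

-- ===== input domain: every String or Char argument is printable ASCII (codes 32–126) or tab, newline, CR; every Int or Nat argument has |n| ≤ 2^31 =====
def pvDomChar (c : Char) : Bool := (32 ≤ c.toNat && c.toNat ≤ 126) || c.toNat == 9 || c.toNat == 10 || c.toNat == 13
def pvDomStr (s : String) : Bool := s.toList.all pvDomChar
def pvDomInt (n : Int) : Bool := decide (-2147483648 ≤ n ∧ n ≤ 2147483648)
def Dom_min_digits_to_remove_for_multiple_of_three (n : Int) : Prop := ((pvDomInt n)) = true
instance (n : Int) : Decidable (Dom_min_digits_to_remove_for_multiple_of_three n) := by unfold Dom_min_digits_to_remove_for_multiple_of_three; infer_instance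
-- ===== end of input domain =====

-- B replaces A's two remainder flags and nested case table by a one-pass DP over the digits
-- (minimal number of removed digits per removed-sum residue class); same O(L) cost, alternative decomposition.

-- ===== PORT A =====
def min_digits_to_remove_for_multiple_of_three (n : Int) : Int :=
  -- list(str(n)); int(c) is ported as (PySem.Int.ofChars? [c]).getD 0 — under Pre_ (0 ≤ n)
  -- every character is a digit, so ofChars? is always `some` and the default is never used.
  let list_n := (PySem.Int.toStr n).toList
  let flags := (PySem.List.pyRange 0 (PySem.List.len list_n)).foldl
    (fun (st : Bool × Bool) i =>
      (if PySem.Int.mod ((PySem.Int.ofChars? [PySem.List.pyGetD list_n i ' ']).getD 0) 3 == 1 then true else st.1,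
       if PySem.Int.mod ((PySem.Int.ofChars? [PySem.List.pyGetD list_n i ' ']).getD 0) 3 == 2 then true else st.2))
    (false, false)
  let amari_1 := flags.1
  let amari_2 := flags.2
  if PySem.Int.mod n 3 == 0 then 0
  else if PySem.Int.mod n 3 == 1 then
    (if amari_1 then (if PySem.List.len list_n == 1 then -1 else 1)
     else if amari_2 then (if PySem.List.len list_n == 2 then -1 else 2)
     else -1)
  else if PySem.Int.mod n 3 == 2 then
    (if amari_2 then (if PySem.List.len list_n == 1 then -1 else 1)
     else if amari_1 then (if PySem.List.len list_n == 2 then -1 else 2)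
     else -1)
  else -1

-- ===== PORT B =====
-- one DP step: best' [t] = min(best[t], best[(t - d%3) % 3] + 1)
def pvStepB (b : Int × Int × Int) (d : Int) : Int × Int × Int :=
  let r := PySem.Int.mod d 3
  let get := fun (t : Int) => if t == 0 then b.1 else if t == 1 then b.2.1 else b.2.2
  (min (get 0) (get (PySem.Int.mod (0 - r) 3) + 1),
   min (get 1) (get (PySem.Int.mod (1 - r) 3) + 1),
   min (get 2) (get (PySem.Int.mod (2 - r) 3) + 1))

def min_digits_to_remove_for_multiple_of_three_alt (n : Int) : Int :=
  let digits := (PySem.Int.toStr n).toList.map (fun c => (PySem.Int.ofChars? [c]).getD 0)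
  let L := PySem.List.len digits
  let best := digits.foldl pvStepB (0, L + 1, L + 1)
  let k := if PySem.Int.mod n 3 == 0 then best.1
           else if PySem.Int.mod n 3 == 1 then best.2.1
           else best.2.2
  if k < L then k else -1

-- ===== PRECONDITION & SPEC =====
-- Pre_ excludes negative arguments, on which A raises ValueError (int() applied to the sign character); B raises there too.
def Pre_min_digits_to_remove_for_multiple_of_three (n : Int) : Prop := 0 ≤ n
instance (n : Int) : Decidable (Pre_min_digits_to_remove_for_multiple_of_three n) := by unfold Pre_min_digits_to_remove_for_multiple_of_three; infer_instance
def pvWitness_min_digits_to_remove_for_multiple_of_three : Int := 57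

def Spec_min_digits_to_remove_for_multiple_of_three (n : Int) (out : Int) : Prop := out = min_digits_to_remove_for_multiple_of_three_alt n
instance (n : Int) (out : Int) : Decidable (Spec_min_digits_to_remove_for_multiple_of_three n out) := by unfold Spec_min_digits_to_remove_for_multiple_of_three; infer_instance

-- ===== CLAIM (what is proved, stated in full; the proofs are below) =====
def Claim_equal_min_digits_to_remove_for_multiple_of_three : Prop := ∀ (n : Int), Dom_min_digits_to_remove_for_multiple_of_three n → Pre_min_digits_to_remove_for_multiple_of_three n → Spec_min_digits_to_remove_for_multiple_of_three n (min_digits_to_remove_for_multiple_of_three n)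

-- ===== LEMMAS AND PROOFS =====

-- str(n) for n > 0 = the base-10 digits of n, most significant first
theorem pv_tdc (f : Nat) : ∀ (n : Nat) (acc : List Char), 0 < n → n < f →
    Nat.toDigitsCore 10 f n acc = ((Nat.digits 10 n).reverse.map Nat.digitChar) ++ acc := by
  induction f with
  | zero => intro n acc h1 h2; omega
  | succ f ih =>
    intro n acc h1 h2
    rw [Nat.toDigitsCore]
    rw [Nat.digits_def' (by norm_num : 1 < 10) h1]
    by_cases h : n / 10 = 0
    · simp [h]
    · simp only [h]
      rw [ih (n/10) _ (Nat.pos_of_ne_zero h) (by omega)]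
      simp

theorem pv_toChars_pos (n : Int) (h : 0 < n) :
    PySem.Int.toChars n = ((Nat.digits 10 n.toNat).reverse.map Nat.digitChar) := by
  have hn : ¬ n < 0 := by omega
  simp [PySem.Int.toChars, hn, Nat.toDigits]
  rw [pv_tdc (n.toNat + 1) n.toNat [] (by omega) (by omega)]
  simp

theorem pv_ofChars_digitChar (d : Nat) (h : d < 10) :
    PySem.Int.ofChars? [Nat.digitChar d] = some (d : Int) := by
  interval_cases d <;> rfl

-- A's flag loop = two `any`s
theorem pv_foldl_flags (p q : Char → Bool) : ∀ (l : List Char) (a b : Bool),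
    l.foldl (fun st c => (if p c then true else st.1, if q c then true else st.2)) (a, b)
      = (a || l.any p, b || l.any q) := by
  intro l
  induction l with
  | nil => intro a b; simp
  | cons c l ih =>
    intro a b
    simp only [List.foldl_cons, List.any_cons, ih]
    cases hp : p c <;> cases hq : q c <;> simp

-- the DP invariant shape
def pvPhi (I : Int) (x y : Nat) : Int := if 1 ≤ x then 1 else if 2 ≤ y then 2 else I

theorem pv_stepB_phi (I : Int) (hI : 2 ≤ I) (c1 c2 : Nat) (d : Int) :
    pvStepB (0, pvPhi I c1 c2, pvPhi I c2 c1) d =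
      (0, pvPhi I (c1 + (if PySem.Int.mod d 3 == 1 then 1 else 0)) (c2 + (if PySem.Int.mod d 3 == 2 then 1 else 0)),
          pvPhi I (c2 + (if PySem.Int.mod d 3 == 2 then 1 else 0)) (c1 + (if PySem.Int.mod d 3 == 1 then 1 else 0))) := by
  have h0 : 0 ≤ PySem.Int.mod d 3 := PySem.Int.mod_nonneg d (by norm_num)
  have h3 : PySem.Int.mod d 3 < 3 := PySem.Int.mod_lt d (by norm_num)
  have hr : PySem.Int.mod d 3 = 0 ∨ PySem.Int.mod d 3 = 1 ∨ PySem.Int.mod d 3 = 2 := by omega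
  rcases hr with hr | hr | hr <;>
    simp only [pvStepB, hr] <;> norm_num <;> (unfold pvPhi ; split_ifs <;> omega)

theorem pv_dp_fold (I : Int) (hI : 2 ≤ I) : ∀ (ws : List Int) (c1 c2 : Nat),
    ws.foldl pvStepB (0, pvPhi I c1 c2, pvPhi I c2 c1) =
      (0, pvPhi I (c1 + ws.countP (fun w => PySem.Int.mod w 3 == 1)) (c2 + ws.countP (fun w => PySem.Int.mod w 3 == 2)),
          pvPhi I (c2 + ws.countP (fun w => PySem.Int.mod w 3 == 2)) (c1 + ws.countP (fun w => PySem.Int.mod w 3 == 1))) := by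
  intro ws
  induction ws with
  | nil => intro c1 c2; simp
  | cons w ws ih =>
    intro c1 c2
    simp only [List.foldl_cons, List.countP_cons]
    rw [pv_stepB_phi I hI, ih]
    simp [Nat.add_comm, Nat.add_assoc]

-- digit-sum mod 3 from residue counts
theorem pv_sum_mod3 (l : List Nat) :
    l.sum % 3 = (l.countP (fun d => d % 3 == 1) + 2 * l.countP (fun d => d % 3 == 2)) % 3 := by
  induction l with
  | nil => simp
  | cons d l ih =>
    simp only [List.sum_cons, List.countP_cons]
    have hd : d % 3 = 0 ∨ d % 3 = 1 ∨ d % 3 = 2 := by omega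
    rcases hd with h | h | h <;> simp [h] <;> omega

theorem pv_mod3_cast (d : Nat) : PySem.Int.mod (d : Int) 3 = ((d % 3 : Nat) : Int) := by
  exact_mod_cast PySem.Int.mod_natCast d 3

-- ===== VERDICT (by name: the statement is the Claim_ definition above) =====
theorem min_digits_to_remove_for_multiple_of_three_spec : Claim_equal_min_digits_to_remove_for_multiple_of_three := by
  intro n hdom hpre
  unfold Spec_min_digits_to_remove_for_multiple_of_three
  by_cases h0 : n = 0
  · subst h0; decide
  · have hn : 0 < n := lt_of_le_of_ne hpre (Ne.symm h0)
    have hnm : n = (n.toNat : Int) := (Int.toNat_of_nonneg hpre).symm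
    have hmpos : 0 < n.toNat := by omega
    have hcs : (PySem.Int.toStr n).toList = (Nat.digits 10 n.toNat).reverse.map Nat.digitChar := by
      rw [PySem.Int.toList_toStr, pv_toChars_pos n hn]
    simp only [min_digits_to_remove_for_multiple_of_three, min_digits_to_remove_for_multiple_of_three_alt]
    rw [PySem.List.foldl_pyRange_pyGetD (PySem.Int.toStr n).toList ' '
      (fun (st : Bool × Bool) (c : Char) =>
        (if PySem.Int.mod ((PySem.Int.ofChars? [c]).getD 0) 3 == 1 then true else st.1,
         if PySem.Int.mod ((PySem.Int.ofChars? [c]).getD 0) 3 == 2 then true else st.2))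
      (false, false) (le_refl 0)]
    simp only [Int.toNat_zero, List.drop_zero]
    simp only [pv_foldl_flags]
    simp only [Bool.false_or]
    -- abbreviations
    have hd10 : ∀ d ∈ (Nat.digits 10 n.toNat).reverse, d < 10 := by
      intro d hd
      exact Nat.digits_lt_base (by norm_num) (List.mem_reverse.mp hd)
    have hmap : (PySem.Int.toStr n).toList.map (fun c => (PySem.Int.ofChars? [c]).getD 0)
        = (Nat.digits 10 n.toNat).reverse.map (fun (d : Nat) => (d : Int)) := by
      rw [hcs, List.map_map]
      apply List.map_congr_left
      intro d hd
      simp [pv_ofChars_digitChar d (hd10 d hd)]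
    have hcnt1 : ((Nat.digits 10 n.toNat).reverse.map (fun (d : Nat) => (d : Int))).countP (fun w => PySem.Int.mod w 3 == 1)
        = (Nat.digits 10 n.toNat).countP (fun d => d % 3 == 1) := by
      rw [List.countP_map, List.countP_reverse]
      apply List.countP_congr
      intro d hd
      simp [Function.comp]
      omega
    have hcnt2 : ((Nat.digits 10 n.toNat).reverse.map (fun (d : Nat) => (d : Int))).countP (fun w => PySem.Int.mod w 3 == 2)
        = (Nat.digits 10 n.toNat).countP (fun d => d % 3 == 2) := by
      rw [List.countP_map, List.countP_reverse]
      apply List.countP_congr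
      intro d hd
      simp [Function.comp]
      omega
    have hne : Nat.digits 10 n.toNat ≠ [] := Nat.digits_ne_nil_iff_ne_zero.mpr (by omega)
    have hL1 : 1 ≤ (Nat.digits 10 n.toNat).length := List.length_pos_iff.mpr hne
    -- A's flags as count positivity
    have hany1 : (PySem.Int.toStr n).toList.any (fun c => PySem.Int.mod ((PySem.Int.ofChars? [c]).getD 0) 3 == 1)
        = decide (0 < (Nat.digits 10 n.toNat).countP (fun d => d % 3 == 1)) := by
      rw [Bool.eq_iff_iff, List.any_eq_true, decide_eq_true_eq, List.countP_pos_iff]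
      constructor
      · rintro ⟨c, hc, hpc⟩
        rw [hcs] at hc
        obtain ⟨d, hd, rfl⟩ := List.mem_map.mp hc
        refine ⟨d, List.mem_reverse.mp hd, ?_⟩
        rw [pv_ofChars_digitChar d (hd10 d hd)] at hpc
        simp at hpc ⊢
        omega
      · rintro ⟨d, hd, h1⟩
        refine ⟨Nat.digitChar d, ?_, ?_⟩
        · rw [hcs]
          exact List.mem_map_of_mem (List.mem_reverse.mpr hd)
        · rw [pv_ofChars_digitChar d (hd10 d (List.mem_reverse.mpr hd))]
          simp at h1 ⊢
          omega
    have hany2 : (PySem.Int.toStr n).toList.any (fun c => PySem.Int.mod ((PySem.Int.ofChars? [c]).getD 0) 3 == 2)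
        = decide (0 < (Nat.digits 10 n.toNat).countP (fun d => d % 3 == 2)) := by
      rw [Bool.eq_iff_iff, List.any_eq_true, decide_eq_true_eq, List.countP_pos_iff]
      constructor
      · rintro ⟨c, hc, hpc⟩
        rw [hcs] at hc
        obtain ⟨d, hd, rfl⟩ := List.mem_map.mp hc
        refine ⟨d, List.mem_reverse.mp hd, ?_⟩
        rw [pv_ofChars_digitChar d (hd10 d hd)] at hpc
        simp at hpc ⊢
        omega
      · rintro ⟨d, hd, h1⟩
        refine ⟨Nat.digitChar d, ?_, ?_⟩
        · rw [hcs]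
          exact List.mem_map_of_mem (List.mem_reverse.mpr hd)
        · rw [pv_ofChars_digitChar d (hd10 d (List.mem_reverse.mpr hd))]
          simp at h1 ⊢
          omega
    have hmodn : PySem.Int.mod n 3 = ((n.toNat % 3 : Nat) : Int) := by
      conv_lhs => rw [hnm]
      exact pv_mod3_cast _
    have hsum : n.toNat % 3 = ((Nat.digits 10 n.toNat).countP (fun d => d % 3 == 1)
        + 2 * (Nat.digits 10 n.toNat).countP (fun d => d % 3 == 2)) % 3 := by
      have h1 := Nat.modEq_digits_sum 3 10 (by norm_num) n.toNat
      unfold Nat.ModEq at h1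
      rw [h1, pv_sum_mod3]
    have hIge : (2 : Int) ≤ ((Nat.digits 10 n.toNat).length : Int) + 1 := by
      omega
    rw [hany1, hany2, hmap, hmodn]
    simp only [PySem.List.len_eq, List.length_map, List.length_reverse, hcs]
    rw [show ((0:Int), ((Nat.digits 10 n.toNat).length : Int) + 1, ((Nat.digits 10 n.toNat).length : Int) + 1)
        = ((0:Int), pvPhi (((Nat.digits 10 n.toNat).length : Int) + 1) 0 0, pvPhi (((Nat.digits 10 n.toNat).length : Int) + 1) 0 0) from by simp [pvPhi]]
    rw [pv_dp_fold _ hIge, hcnt1, hcnt2]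
    simp only [Nat.zero_add]
    have hc1le : (Nat.digits 10 n.toNat).countP (fun d => d % 3 == 1) ≤ (Nat.digits 10 n.toNat).length := List.countP_le_length
    have hc2le : (Nat.digits 10 n.toNat).countP (fun d => d % 3 == 2) ≤ (Nat.digits 10 n.toNat).length := List.countP_le_length
    have hr : n.toNat % 3 = 0 ∨ n.toNat % 3 = 1 ∨ n.toNat % 3 = 2 := by omega
    have hn1 : 0 < List.countP (fun d => d % 3 == 1) (Nat.digits 10 n.toNat) ↔ (∃ d ∈ Nat.digits 10 n.toNat, d % 3 = 1) := by
      rw [List.countP_pos_iff]; simp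
    have hn2 : 0 < List.countP (fun d => d % 3 == 2) (Nat.digits 10 n.toNat) ↔ (∃ d ∈ Nat.digits 10 n.toNat, d % 3 = 2) := by
      rw [List.countP_pos_iff]; simp
    rcases hr with hr | hr | hr <;> rw [hr] <;>
      rcases Nat.eq_zero_or_pos (List.countP (fun d => d % 3 == 1) (Nat.digits 10 n.toNat)) with hc1 | hc1 <;>
      rcases Nat.eq_zero_or_pos (List.countP (fun d => d % 3 == 2) (Nat.digits 10 n.toNat)) with hc2 | hc2 <;>
      simp [pvPhi, hne, hc1, hc2, ← hn1, ← hn2] <;> (try split_ifs) <;> omega
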